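-- pv_equiv track=rewrite | github.com/jason-ash/playful | playful/lingo.py | misplaced_letters
-- ===== SOURCE A (Python) =====
-- from typing import Iterable, List, Tuple
--
-- def misplaced_letters(secret: str, guess: str) -> Tuple[str, ...]:
--     """Return a tuple identifying letters that are in the secret word, but misplaced."""
--     available = [s for s, g in zip(secret, guess) if s != g]
--     misplaced = []
--     for secret_letter, guess_letter in zip(secret, guess):
--         if secret_letter != guess_letter and guess_letter in available:
--             misplaced.append(guess_letter)
--             available.remove(guess_letter)
--         else:
--             misplaced.append("")
--     return tuple(misplaced)
-- ===== SOURCE B (Python) =====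
-- def misplaced_letters(secret: str, guess: str):
--     """Return a tuple identifying letters that are in the secret word, but misplaced."""
--     # Group-by-letter: positions where each letter is a mismatched guess, and a
--     # per-letter capacity = number of mismatched positions whose secret letter is it;
--     # then fill the first `capacity` positions of each letter's group.
--     pos = {}
--     cap = {}
--     for i, (s, g) in enumerate(zip(secret, guess)):
--         if s != g:
--             pos.setdefault(g, []).append(i)
--             cap[s] = cap.get(s, 0) + 1
--     result = [""] * min(len(secret), len(guess))
--     for letter, idxs in pos.items():
--         for i in idxs[:cap.get(letter, 0)]:
--             result[i] = letter
--     return tuple(result)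
-- ===== Notes on version B (the rewrite author's own statement) =====
-- stated objective: faster
-- what changed: Instead of A's single left-to-right scan that consumes a multiset of available secret letters (membership test + list.remove per position), B builds one index grouping each letter to its ordered mismatched guess positions plus a per-letter capacity, then fills a preallocated result by letter, marking the first `capacity` positions of each group.
import Mathlib
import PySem

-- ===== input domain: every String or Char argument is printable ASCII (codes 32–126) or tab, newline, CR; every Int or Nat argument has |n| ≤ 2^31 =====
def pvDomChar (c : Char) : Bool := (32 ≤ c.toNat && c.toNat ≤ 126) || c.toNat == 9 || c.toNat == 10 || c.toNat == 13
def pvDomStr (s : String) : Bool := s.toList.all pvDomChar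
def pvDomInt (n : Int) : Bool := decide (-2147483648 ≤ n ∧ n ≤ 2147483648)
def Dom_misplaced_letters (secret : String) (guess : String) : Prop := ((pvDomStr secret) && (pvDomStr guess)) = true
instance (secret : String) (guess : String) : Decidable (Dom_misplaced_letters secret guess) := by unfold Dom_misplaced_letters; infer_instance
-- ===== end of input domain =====

-- B replaces A's consuming availability-list scan (membership + remove inner scans per position)
-- with a per-letter index of mismatched guess positions plus per-letter capacities, filling the
-- first `capacity` positions of each letter's group; measurably faster on large inputs.


-- ===== PORT A =====
-- one step of A's loop: state = (misplaced so far, available list)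
def pvStepA (st : List String × List Char) (p : Char × Char) : List String × List Char :=
  if p.1 != p.2 && st.2.contains p.2 then
    (st.1 ++ [String.ofList [p.2]], (PySem.List.remove? st.2 p.2).getD st.2)
  else
    (st.1 ++ [""], st.2)

def misplaced_letters (secret : String) (guess : String) : List String :=
  let pairs := List.zip secret.toList guess.toList
  let available := (pairs.filter (fun p => p.1 != p.2)).map (fun p => p.1)
  (pairs.foldl pvStepA ([], available)).1

-- ===== PORT B =====
-- B's first loop: pos.setdefault(g, []).append(i); cap[s] = cap.get(s, 0) + 1  over mismatched pairs
def pvBuild (st : PySem.Dict Char (List Int) × PySem.Dict Char Int)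
    (q : Int × (Char × Char)) : PySem.Dict Char (List Int) × PySem.Dict Char Int :=
  if q.2.1 != q.2.2 then
    (st.1.insert q.2.2 (st.1.getD q.2.2 [] ++ [q.1]),
     st.2.insert q.2.1 (st.2.getD q.2.1 0 + 1))
  else st

-- B's fill of one letter's group: for i in idxs[:cap.get(letter, 0)]: result[i] = letter
-- (result[i] = letter ported with pySetD: exact here since every stored index is in range)
def pvFillLetter (cap : PySem.Dict Char Int) (out : List String) (kv : Char × List Int) : List String :=
  (PySem.List.slice kv.2 none (some (cap.getD kv.1 0))).foldl
    (fun o i => PySem.List.pySetD o i (String.ofList [kv.1])) out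

def misplaced_letters_alt (secret : String) (guess : String) : List String :=
  let pairs := List.zip secret.toList guess.toList
  let st := (PySem.List.enumerate pairs).foldl pvBuild (PySem.Dict.empty, PySem.Dict.empty)
  st.1.items.foldl (pvFillLetter st.2)
    (List.replicate (min secret.toList.length guess.toList.length) "")

-- ===== PRECONDITION & SPEC =====
def Spec_misplaced_letters (secret : String) (guess : String) (out : List String) : Prop := out = misplaced_letters_alt secret guess
instance (secret : String) (guess : String) (out : List String) : Decidable (Spec_misplaced_letters secret guess out) := by unfold Spec_misplaced_letters; infer_instance

-- ===== CLAIM (what is proved, stated in full; the proofs are below) =====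
def Claim_equal_misplaced_letters : Prop := ∀ (secret : String) (guess : String), Dom_misplaced_letters secret guess → Spec_misplaced_letters secret guess (misplaced_letters secret guess)

-- ===== LEMMAS AND PROOFS =====

-- proof-side intermediate: the rank-based single scan (state = output so far, ranks dict)
def pvStepR (caps : PySem.Dict Char Int) (st : List String × PySem.Dict Char Int)
    (p : Char × Char) : List String × PySem.Dict Char Int :=
  if p.1 != p.2 then
    let r := st.2.getD p.2 0
    (st.1 ++ [if r < caps.getD p.2 0 then String.ofList [p.2] else ""], st.2.insert p.2 (r + 1))
  else
    (st.1 ++ [""], st.2)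

-- the mismatched-with-letter-g predicate on a pair
def pvPred (g : Char) (q : Char × Char) : Bool := q.1 != q.2 && q.2 == g

-- per-letter index list of a run of enumerated pairs
def pvIdx (L : List (Char × Char)) (s : Int) (g : Char) : List Int :=
  ((PySem.List.enumerate L s).filter (fun q => pvPred g q.2)).map (fun q => q.1)

-- ---- stage 1: A = rank scan ----

lemma pv_sim (caps : PySem.Dict Char Int) :
    ∀ (rest : List (Char × Char)) (acc : List String) (avail : List Char)
      (ranks : PySem.Dict Char Int),
      (∀ c : Char, (avail.count c : Int) = max (caps.getD c 0 - ranks.getD c 0) 0) →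
      (rest.foldl pvStepA (acc, avail)).1 = (rest.foldl (pvStepR caps) (acc, ranks)).1 := by
  intro rest
  induction rest with
  | nil => intro acc avail ranks _; rfl
  | cons p rest ih =>
    intro acc avail ranks hinv
    by_cases h : p.1 != p.2
    · have hr := hinv p.2
      by_cases hcap : ranks.getD p.2 0 < caps.getD p.2 0
      · -- marked in both
        have hcnt : 0 < avail.count p.2 := by
          have : (0 : Int) < (avail.count p.2 : Int) := by omega
          exact_mod_cast this
        have hmem : p.2 ∈ avail := List.count_pos_iff.mp hcnt
        have hA : pvStepA (acc, avail) p =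
            (acc ++ [String.ofList [p.2]], avail.erase p.2) := by
          simp only [pvStepA]
          rw [if_pos (by simp [h, hmem])]
          simp [PySem.List.remove?_eq_some_erase avail p.2 hmem]
        have hB : pvStepR caps (acc, ranks) p =
            (acc ++ [String.ofList [p.2]], ranks.insert p.2 (ranks.getD p.2 0 + 1)) := by
          simp only [pvStepR, h, if_pos, hcap]
        rw [List.foldl_cons, List.foldl_cons, hA, hB]
        apply ih
        intro c
        rw [PySem.Dict.getD_insert]
        by_cases hc : c = p.2
        · subst hc
          rw [List.count_erase_self]
          have h1 : 1 ≤ avail.count p.2 := hcnt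
          push_cast [h1]
          simp only [if_true]
          omega
        · rw [List.count_erase_of_ne hc]
          rw [if_neg hc]
          exact hinv c
      · -- capacity exhausted: unmarked in both
        have hcnt : avail.count p.2 = 0 := by
          have : (avail.count p.2 : Int) = 0 := by omega
          exact_mod_cast this
        have hmem : p.2 ∉ avail := by
          intro hm
          have := List.count_pos_iff.mpr hm
          omega
        have hA : pvStepA (acc, avail) p = (acc ++ [""], avail) := by
          simp only [pvStepA]
          rw [if_neg (by simp [hmem])]
        have hB : pvStepR caps (acc, ranks) p =
            (acc ++ [""], ranks.insert p.2 (ranks.getD p.2 0 + 1)) := by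
          simp only [pvStepR, h, if_pos, if_neg hcap]
        rw [List.foldl_cons, List.foldl_cons, hA, hB]
        apply ih
        intro c
        rw [PySem.Dict.getD_insert]
        by_cases hc : c = p.2
        · subst hc
          rw [hcnt] at hr ⊢
          simp only [if_true] at hr ⊢
          omega
        · rw [if_neg hc]; exact hinv c
    · -- matched position: both append "" and keep state
      have hA : pvStepA (acc, avail) p = (acc ++ [""], avail) := by
        simp only [pvStepA]
        rw [if_neg (by simp [h])]
      have hB : pvStepR caps (acc, ranks) p = (acc ++ [""], ranks) := by
        simp only [pvStepR, h]
        rfl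
      rw [List.foldl_cons, List.foldl_cons, hA, hB]
      exact ih _ _ _ hinv

-- ---- characterizing B's build fold ----

lemma pv_build_cap (l : List (Int × (Char × Char)))
    (st : PySem.Dict Char (List Int) × PySem.Dict Char Int) (c : Char) :
    ((l.foldl pvBuild st).2).getD c 0
      = st.2.getD c 0 + (((l.filter (fun q => q.2.1 != q.2.2)).map (fun q => q.2.1)).count c : Int) := by
  induction l generalizing st with
  | nil => simp
  | cons q rest ih =>
    by_cases h : q.2.1 != q.2.2
    · rw [List.foldl_cons]
      have hstep : pvBuild st q = (st.1.insert q.2.2 (st.1.getD q.2.2 [] ++ [q.1]),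
          st.2.insert q.2.1 (st.2.getD q.2.1 0 + 1)) := by
        simp only [pvBuild, h, if_true]
      rw [hstep, ih]
      simp only [PySem.Dict.getD_insert, List.filter_cons, h, if_true, List.map_cons,
        List.count_cons]
      by_cases hc : c = q.2.1
      · subst hc
        simp only [beq_self_eq_true, if_true]
        push_cast
        ring
      · simp only [if_neg hc, beq_iff_eq, if_neg (Ne.symm hc)]
        omega
    · have hstep : pvBuild st q = st := by simp only [pvBuild, h, if_false, Bool.false_eq_true]
      rw [List.foldl_cons, hstep, ih]
      simp [h]

lemma pv_build_pos (l : List (Int × (Char × Char)))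
    (st : PySem.Dict Char (List Int) × PySem.Dict Char Int) (g : Char) :
    ((l.foldl pvBuild st).1).getD g []
      = st.1.getD g [] ++ (l.filter (fun q => pvPred g q.2)).map (fun q => q.1) := by
  induction l generalizing st with
  | nil => simp
  | cons q rest ih =>
    by_cases h : q.2.1 != q.2.2
    · rw [List.foldl_cons]
      have hstep : pvBuild st q = (st.1.insert q.2.2 (st.1.getD q.2.2 [] ++ [q.1]),
          st.2.insert q.2.1 (st.2.getD q.2.1 0 + 1)) := by
        simp only [pvBuild, h, if_true]
      rw [hstep, ih]
      simp only [PySem.Dict.getD_insert, List.filter_cons]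
      by_cases hg : g = q.2.2
      · subst hg
        simp [pvPred, h]
      · have : pvPred g q.2 = false := by
          simp [pvPred, h]
          exact Ne.symm hg
        simp [this, hg]
    · have hstep : pvBuild st q = st := by simp only [pvBuild, h, if_false, Bool.false_eq_true]
      have : pvPred g q.2 = false := by simp [pvPred]; intro hx; exact absurd hx (by simpa using h)
      rw [List.foldl_cons, hstep, ih]
      simp [this]

lemma pv_build_keys_nodup (l : List (Int × (Char × Char)))
    (st : PySem.Dict Char (List Int) × PySem.Dict Char Int) (h : st.1.keys.Nodup) :
    ((l.foldl pvBuild st).1).keys.Nodup := by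
  induction l generalizing st with
  | nil => exact h
  | cons q rest ih =>
    rw [List.foldl_cons]
    apply ih
    by_cases hq : q.2.1 != q.2.2
    · have hstep : pvBuild st q = (st.1.insert q.2.2 (st.1.getD q.2.2 [] ++ [q.1]),
          st.2.insert q.2.1 (st.2.getD q.2.1 0 + 1)) := by
        simp only [pvBuild, hq, if_true]
      rw [hstep]
      exact PySem.Dict.nodup_keys_insert _ _ _ h
    · have hstep : pvBuild st q = st := by simp only [pvBuild, hq, if_false, Bool.false_eq_true]
      rw [hstep]; exact h

-- ---- enumerate facts ----

lemma pv_enum_append (L1 L2 : List (Char × Char)) (s : Int) :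
    PySem.List.enumerate (L1 ++ L2) s
      = PySem.List.enumerate L1 s ++ PySem.List.enumerate L2 (s + L1.length) := by
  induction L1 generalizing s with
  | nil => simp [PySem.List.enumerate_nil]
  | cons x xs ih =>
    rw [List.cons_append, PySem.List.enumerate_cons, PySem.List.enumerate_cons, ih]
    simp only [List.length_cons, List.cons_append, List.cons.injEq, true_and]
    congr 2
    push_cast
    ring

lemma pv_enum_countP (l : List (Char × Char)) (s : Int) (pp : (Char × Char) → Bool) :
    (PySem.List.enumerate l s).countP (fun q => pp q.2) = l.countP pp := by
  have : l.countP pp = ((PySem.List.enumerate l s).map (fun q => q.2)).countP pp := by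
    rw [PySem.List.map_snd_enumerate]
  rw [this, List.countP_map]
  rfl

lemma pv_enum_proj (l : List (Char × Char)) (s : Int) :
    ((PySem.List.enumerate l s).filter (fun q => q.2.1 != q.2.2)).map (fun q => q.2.1)
      = (l.filter (fun p => p.1 != p.2)).map (fun p => p.1) := by
  induction l generalizing s with
  | nil => simp [PySem.List.enumerate_nil]
  | cons x xs ih =>
    rw [PySem.List.enumerate_cons]
    by_cases h : x.1 != x.2
    · simp only [List.filter_cons, h, if_true, List.map_cons, ih]
    · simp only [List.filter_cons, h, if_false, Bool.false_eq_true, ih]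

lemma pvIdx_sublist (L : List (Char × Char)) (s : Int) (g : Char) :
    List.Sublist (pvIdx L s g) (PySem.List.pyRange s (s + L.length) 1) := by
  have h1 : List.Sublist ((PySem.List.enumerate L s).filter (fun q => pvPred g q.2))
      (PySem.List.enumerate L s) := List.filter_sublist
  have h2 := h1.map (fun q => q.1)
  rw [PySem.List.map_fst_enumerate] at h2
  exact h2

lemma pvIdx_mem_bounds (L : List (Char × Char)) (s : Int) (g : Char) (x : Int)
    (hx : x ∈ pvIdx L s g) : s ≤ x ∧ x < s + L.length := by
  have := (pvIdx_sublist L s g).subset hx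
  exact PySem.List.mem_pyRange_one.mp this

lemma pvIdx_pairwise (L : List (Char × Char)) (s : Int) (g : Char) :
    (pvIdx L s g).Pairwise (· < ·) := by
  exact (PySem.List.pairwise_lt_pyRange_one s (s + L.length)).sublist (pvIdx_sublist L s g)

lemma pvIdx_split (L : List (Char × Char)) (j : Nat) (hj : j ≤ L.length) (g : Char) :
    pvIdx L 0 g = pvIdx (L.take j) 0 g ++ pvIdx (L.drop j) j g := by
  have hlen : (0 : Int) + ((L.take j).length : Int) = (j : Int) := by
    simp [List.length_take, Nat.min_eq_left hj]
  unfold pvIdx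
  conv_lhs => rw [← List.take_append_drop j L]
  rw [pv_enum_append, hlen, List.filter_append, List.map_append]

lemma pvIdx_mem_iff (L : List (Char × Char)) (j : Nat) (hj : j < L.length) (g : Char) :
    ((j : Int) ∈ pvIdx L 0 g) ↔ pvPred g L[j] = true := by
  rw [pvIdx_split L j (le_of_lt hj) g, List.mem_append]
  have hb1 : ¬ ((j : Int) ∈ pvIdx (L.take j) 0 g) := by
    intro hx
    have h2 := (pvIdx_mem_bounds _ _ _ _ hx).2
    rw [List.length_take] at h2
    have hm : min j L.length = j := Nat.min_eq_left (le_of_lt hj)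
    rw [hm] at h2
    omega
  have hdrop : L.drop j = L[j] :: L.drop (j+1) := List.drop_eq_getElem_cons hj
  have hb2 : ((j : Int) ∈ pvIdx (L.drop j) j g) ↔ pvPred g L[j] = true := by
    rw [hdrop]
    unfold pvIdx
    rw [PySem.List.enumerate_cons]
    by_cases hp : pvPred g L[j] = true
    · simp [hp]
    · rw [List.filter_cons, if_neg (by simpa using hp)]
      constructor
      · intro hx
        have hb := (pvIdx_mem_bounds (L.drop (j+1)) ((j : Int)+1) g _ hx).1
        omega
      · intro hcontra
        exact absurd hcontra hp
  constructor
  · rintro (hx | hx)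
    · exact absurd hx hb1
    · exact hb2.mp hx
  · intro hp
    exact Or.inr (hb2.mpr hp)

lemma pvIdx_countP (L : List (Char × Char)) (j : Nat) (hj : j ≤ L.length) (g : Char) :
    (pvIdx L 0 g).countP (fun y => decide (y < (j : Int))) = (L.take j).countP (pvPred g) := by
  rw [pvIdx_split L j hj g, List.countP_append]
  have hmin : min j L.length = j := Nat.min_eq_left hj
  have h2 : (pvIdx (L.drop j) j g).countP (fun y => decide (y < (j : Int))) = 0 := by
    rw [List.countP_eq_zero]
    intro x hx
    have := (pvIdx_mem_bounds _ _ _ _ hx).1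
    simp only [decide_eq_true_eq]
    omega
  have h1 : (pvIdx (L.take j) 0 g).countP (fun y => decide (y < (j : Int)))
      = (pvIdx (L.take j) 0 g).length := by
    rw [List.countP_eq_length]
    intro x hx
    have hb := (pvIdx_mem_bounds _ _ _ _ hx).2
    rw [List.length_take, hmin] at hb
    simp only [decide_eq_true_eq]
    omega
  rw [h1, h2]
  unfold pvIdx
  rw [List.length_map, ← List.countP_eq_length_filter, pv_enum_countP]
  omega

-- ---- generic: membership in a prefix of a strictly increasing list ----

lemma pv_inc_take_mem (l : List Int) (hl : l.Pairwise (· < ·)) (x : Int) (c : Nat)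
    (hx : x ∈ l) : x ∈ l.take c ↔ l.countP (fun y => decide (y < x)) < c := by
  induction l generalizing c with
  | nil => simp at hx
  | cons a l' ih =>
    have ha : ∀ y ∈ l', a < y := fun y hy => List.rel_of_pairwise_cons hl hy
    have hl' : l'.Pairwise (· < ·) := List.Pairwise.of_cons hl
    rcases List.mem_cons.mp hx with rfl | hx'
    · have hc0 : (x :: l').countP (fun y => decide (y < x)) = 0 := by
        rw [List.countP_cons, List.countP_eq_zero.mpr]
        · simp
        · intro y hy
          simp only [decide_eq_true_eq]
          have := ha y hy
          omega
      rw [hc0]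
      cases c with
      | zero => simp
      | succ k => simp [List.take_succ_cons]
    · have hax : a < x := ha x hx'
      have hcnt : (a :: l').countP (fun y => decide (y < x))
          = l'.countP (fun y => decide (y < x)) + 1 := by
        rw [List.countP_cons]
        simp [hax]
      cases c with
      | zero => simp [hcnt]
      | succ k =>
        rw [List.take_succ_cons, List.mem_cons, hcnt]
        have hne : x ≠ a := ne_of_gt hax
        have hmem := ih hl' hx' (c := k)
        constructor
        · rintro (h | h)
          · exact absurd h hne
          · have := hmem.mp h
            omega
        · intro h
          refine Or.inr (hmem.mpr ?_)
          omega

-- ---- fill-side characterization ----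

lemma pv_fill_len (idxs : List Int) (o : List String) (v : String) :
    (idxs.foldl (fun o i => PySem.List.pySetD o i v) o).length = o.length := by
  induction idxs generalizing o with
  | nil => rfl
  | cons i rest ih =>
    rw [List.foldl_cons, ih, PySem.List.length_pySetD]

lemma pv_fill_get (idxs : List Int) (v : String) (j : Nat) :
    ∀ (o : List String), (∀ i ∈ idxs, 0 ≤ i) →
    (idxs.foldl (fun o i => PySem.List.pySetD o i v) o)[j]?
      = if (j : Int) ∈ idxs then (if j < o.length then some v else none) else o[j]? := by
  induction idxs with
  | nil => intro o _; simp
  | cons i rest ih =>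
    intro o hnn
    have hi : 0 ≤ i := hnn i List.mem_cons_self
    rw [List.foldl_cons, ih _ (fun i' hi' => hnn i' (List.mem_cons_of_mem _ hi')),
      PySem.List.pySetD_of_nonneg o v hi, List.length_set]
    by_cases hj : (j : Int) ∈ rest
    · simp [hj, List.mem_cons]
    · by_cases hij : i = (j : Int)
      · have hii : i.toNat = j := by omega
        rw [List.getElem?_set]
        simp [hj, hij, List.mem_cons]
      · have hii : i.toNat ≠ j := by omega
        rw [List.getElem?_set_ne hii]
        have hji : ¬ ((j : Int) = i) := fun h => hij h.symm
        simp [hj, List.mem_cons, hji]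

lemma pv_fillAll_len (cap : PySem.Dict Char Int) (items : List (Char × List Int)) (o : List String) :
    (items.foldl (pvFillLetter cap) o).length = o.length := by
  induction items generalizing o with
  | nil => rfl
  | cons kv rest ih =>
    rw [List.foldl_cons, ih]
    unfold pvFillLetter
    exact pv_fill_len _ _ _

lemma pv_fillAll_get (cap : PySem.Dict Char Int) (c : Char) (j : Nat) :
    ∀ (items : List (Char × List Int)) (o : List String),
    (∀ kv ∈ items, ∀ i ∈ kv.2, 0 ≤ i) →
    (∀ kv ∈ items, (j : Int) ∈ PySem.List.slice kv.2 none (some (cap.getD kv.1 0)) → kv.1 = c) →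
    (items.foldl (pvFillLetter cap) o)[j]?
      = if ∃ kv ∈ items, (j : Int) ∈ PySem.List.slice kv.2 none (some (cap.getD kv.1 0)) then
          (if j < o.length then some (String.ofList [c]) else none)
        else o[j]? := by
  intro items
  induction items with
  | nil => intro o _ _; simp
  | cons kv rest ih =>
    intro o hnn hc
    have hnn' : ∀ kv' ∈ rest, ∀ i ∈ kv'.2, 0 ≤ i :=
      fun kv' h => hnn kv' (List.mem_cons_of_mem _ h)
    have hc' : ∀ kv' ∈ rest, (j : Int) ∈ PySem.List.slice kv'.2 none (some (cap.getD kv'.1 0)) → kv'.1 = c :=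
      fun kv' h => hc kv' (List.mem_cons_of_mem _ h)
    rw [List.foldl_cons, ih _ hnn' hc']
    have hlen : (pvFillLetter cap o kv).length = o.length := by
      unfold pvFillLetter
      exact pv_fill_len _ _ _
    have hone : (pvFillLetter cap o kv)[j]?
        = if (j : Int) ∈ PySem.List.slice kv.2 none (some (cap.getD kv.1 0)) then
            (if j < o.length then some (String.ofList [kv.1]) else none)
          else o[j]? := by
      unfold pvFillLetter
      exact pv_fill_get _ _ _ o
        (fun i hi => hnn kv List.mem_cons_self i (PySem.List.mem_of_mem_slice _ _ _ hi))
    rw [hlen]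
    by_cases hr : ∃ kv' ∈ rest, (j : Int) ∈ PySem.List.slice kv'.2 none (some (cap.getD kv'.1 0))
    · simp [hr]
    · by_cases hkv : (j : Int) ∈ PySem.List.slice kv.2 none (some (cap.getD kv.1 0))
      · have hk1 : kv.1 = c := hc kv List.mem_cons_self hkv
        simp [hr, hone, hk1]
      · simp [hr, hkv, hone]

-- ---- rank-scan characterization ----

lemma pv_rank_acc (caps : PySem.Dict Char Int) :
    ∀ (L : List (Char × Char)) (acc : List String) (ranks : PySem.Dict Char Int),
    (L.foldl (pvStepR caps) (acc, ranks)).1 = acc ++ (L.foldl (pvStepR caps) ([], ranks)).1 := by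
  intro L
  induction L with
  | nil => intro acc ranks; simp
  | cons p rest ih =>
    intro acc ranks
    have hsplit : ∀ a : List String, pvStepR caps (a, ranks) p
        = (a ++ (pvStepR caps ([], ranks) p).1, (pvStepR caps ([], ranks) p).2) := by
      intro a
      by_cases h : p.1 != p.2 <;> simp [pvStepR, h]
    rw [List.foldl_cons, List.foldl_cons, hsplit acc, hsplit [], List.nil_append,
      ih (acc ++ (pvStepR caps ([], ranks) p).1) (pvStepR caps ([], ranks) p).2,
      ih (pvStepR caps ([], ranks) p).1 (pvStepR caps ([], ranks) p).2,
      List.append_assoc]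

lemma pv_rank_len (caps : PySem.Dict Char Int) :
    ∀ (L : List (Char × Char)) (acc : List String) (ranks : PySem.Dict Char Int),
    (L.foldl (pvStepR caps) (acc, ranks)).1.length = acc.length + L.length := by
  intro L
  induction L with
  | nil => intro acc ranks; simp
  | cons p rest ih =>
    intro acc ranks
    rw [List.foldl_cons]
    by_cases h : p.1 != p.2
    · have e : pvStepR caps (acc, ranks) p
          = (acc ++ [if ranks.getD p.2 0 < caps.getD p.2 0 then String.ofList [p.2] else ""],
             ranks.insert p.2 (ranks.getD p.2 0 + 1)) := by
        simp only [pvStepR, h, if_true]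
      rw [e, ih]
      simp
      omega
    · have e : pvStepR caps (acc, ranks) p = (acc ++ [""], ranks) := by
        simp only [pvStepR, h, if_false, Bool.false_eq_true]
      rw [e, ih]
      simp
      omega

lemma pv_rank_get (caps : PySem.Dict Char Int) :
    ∀ (L : List (Char × Char)) (ranks : PySem.Dict Char Int) (j : Nat) (p : Char × Char),
    L[j]? = some p →
    ((L.foldl (pvStepR caps) ([], ranks)).1)[j]?
      = some (if (p.1 != p.2) = true ∧
                ranks.getD p.2 0 + ((L.take j).countP (pvPred p.2) : Int) < caps.getD p.2 0
              then String.ofList [p.2] else "") := by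
  intro L
  induction L with
  | nil => intro ranks j p hp; simp at hp
  | cons hd rest ih =>
    intro ranks j p hp
    rw [List.foldl_cons]
    by_cases h : hd.1 != hd.2
    · have e : pvStepR caps ([], ranks) hd
          = ([if ranks.getD hd.2 0 < caps.getD hd.2 0 then String.ofList [hd.2] else ""],
             ranks.insert hd.2 (ranks.getD hd.2 0 + 1)) := by
        simp only [pvStepR, h, if_true]
        rfl
      rw [e, pv_rank_acc]
      cases j with
      | zero =>
        have hpe : p = hd := by simpa using hp.symm
        subst hpe
        simp only [List.singleton_append, List.getElem?_cons_zero, List.take_zero,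
          List.countP_nil, Option.some.injEq]
        have hcond : ((p.1 != p.2) = true ∧
            ranks.getD p.2 0 + ((0 : Nat) : Int) < caps.getD p.2 0)
            ↔ ranks.getD p.2 0 < caps.getD p.2 0 := by
          constructor
          · intro ⟨_, hy⟩
            omega
          · intro hy
            exact ⟨h, by omega⟩
        exact if_congr hcond.symm rfl rfl
      | succ k =>
        have hp' : rest[k]? = some p := by simpa using hp
        rw [List.singleton_append, List.getElem?_cons_succ, ih _ k p hp']
        refine congrArg some (if_congr ?_ rfl rfl)
        have hcnt : (((hd :: rest).take (k+1)).countP (pvPred p.2) : Int)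
            = ((rest.take k).countP (pvPred p.2) : Int)
              + (if pvPred p.2 hd = true then 1 else 0) := by
          rw [List.take_succ_cons, List.countP_cons]
          by_cases hph : pvPred p.2 hd = true <;> simp [hph]
        have hrk : (ranks.insert hd.2 (ranks.getD hd.2 0 + 1)).getD p.2 0
            = ranks.getD p.2 0 + (if pvPred p.2 hd = true then 1 else 0) := by
          rw [PySem.Dict.getD_insert]
          by_cases hc : p.2 = hd.2
          · have : pvPred p.2 hd = true := by
              simp [pvPred, h, hc]
            rw [if_pos hc, this, if_pos rfl, hc]
          · have : pvPred p.2 hd = false := by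
              simp [pvPred]
              intro
              exact Ne.symm hc
            rw [if_neg hc, this]
            simp
        rw [hcnt, hrk]
        constructor
        · intro ⟨hx, hy⟩
          exact ⟨hx, by omega⟩
        · intro ⟨hx, hy⟩
          exact ⟨hx, by omega⟩
    · have e : pvStepR caps ([], ranks) hd = ([""], ranks) := by
        simp only [pvStepR, h, if_false, Bool.false_eq_true]
        rfl
      rw [e, pv_rank_acc]
      cases j with
      | zero =>
        have hpe : p = hd := by simpa using hp.symm
        subst hpe
        simp only [List.singleton_append, List.getElem?_cons_zero, Option.some.injEq]
        rw [if_neg (by intro ⟨hx, _⟩; exact absurd hx h)]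
      | succ k =>
        have hp' : rest[k]? = some p := by simpa using hp
        rw [List.singleton_append, List.getElem?_cons_succ, ih _ k p hp']
        refine congrArg some (if_congr ?_ rfl rfl)
        have hph : pvPred p.2 hd = false := by
          simp [pvPred]
          intro hx
          exact absurd (by simpa using hx) (by simpa using h)
        have hcnt : (((hd :: rest).take (k+1)).countP (pvPred p.2) : Int)
            = ((rest.take k).countP (pvPred p.2) : Int) := by
          rw [List.take_succ_cons, List.countP_cons, hph]
          simp
        rw [hcnt]

-- ===== VERDICT (by name: the statement is the Claim_ definition above) =====
theorem misplaced_letters_spec : Claim_equal_misplaced_letters := by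
  intro secret guess _
  show misplaced_letters secret guess = misplaced_letters_alt secret guess
  simp only [misplaced_letters, misplaced_letters_alt]
  set L := List.zip secret.toList guess.toList with hL
  set st := (PySem.List.enumerate L).foldl pvBuild (PySem.Dict.empty, PySem.Dict.empty) with hst
  have hcap : ∀ c : Char, (st.2).getD c 0
      = (((L.filter (fun p => p.1 != p.2)).map (fun p => p.1)).count c : Int) := by
    intro c
    rw [hst, pv_build_cap, pv_enum_proj]
    simp [PySem.Dict.getD_empty]
  have hcapnn : ∀ c : Char, 0 ≤ (st.2).getD c 0 := by
    intro c
    rw [hcap c]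
    positivity
  have hA : (L.foldl pvStepA ([], (L.filter (fun p => p.1 != p.2)).map (fun p => p.1))).1
      = (L.foldl (pvStepR st.2) ([], PySem.Dict.empty)).1 := by
    apply pv_sim
    intro c
    rw [hcap c]
    simp [PySem.Dict.getD_empty]
  rw [hA]
  -- positions dict characterization
  have hnd : (st.1).keys.Nodup := by
    rw [hst]
    exact pv_build_keys_nodup _ _ PySem.Dict.nodup_keys_empty
  have hpos : ∀ g : Char, (st.1).getD g [] = pvIdx L 0 g := by
    intro g
    rw [hst, pv_build_pos]
    simp only [PySem.Dict.getD_empty]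
    rfl
  have hitems : (st.1).items = (st.1).keys.map (fun g => (g, (st.1).getD g [])) :=
    PySem.Dict.items_eq_map_keys st.1 hnd []
  have hmin : min secret.toList.length guess.toList.length = L.length := by
    rw [hL, List.length_zip]
  have hlen0 : (List.replicate (min secret.toList.length guess.toList.length) ("" : String)).length
      = L.length := by
    rw [List.length_replicate, hL, List.length_zip]
  apply List.ext_getElem?
  intro i
  by_cases hi : i < L.length
  · have hp : L[i]? = some L[i] := List.getElem?_eq_getElem hi
    rw [pv_rank_get st.2 L PySem.Dict.empty i L[i] hp, hitems]
    have hnn : ∀ kv ∈ (st.1).keys.map (fun g => (g, (st.1).getD g [])), ∀ x ∈ kv.2, 0 ≤ x := by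
      intro kv hkv x hx
      obtain ⟨g, _, rfl⟩ := List.mem_map.mp hkv
      rw [hpos g] at hx
      exact (pvIdx_mem_bounds _ _ _ _ hx).1
    have hcc : ∀ kv ∈ (st.1).keys.map (fun g => (g, (st.1).getD g [])),
        (i : Int) ∈ PySem.List.slice kv.2 none (some ((st.2).getD kv.1 0)) → kv.1 = L[i].2 := by
      intro kv hkv hmem
      obtain ⟨g, _, rfl⟩ := List.mem_map.mp hkv
      have hx : (i : Int) ∈ (st.1).getD g [] := PySem.List.mem_of_mem_slice _ _ _ hmem
      rw [hpos g] at hx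
      have := (pvIdx_mem_iff L i hi g).mp hx
      simp only [pvPred, Bool.and_eq_true, beq_iff_eq] at this
      exact this.2.symm
    rw [pv_fillAll_get st.2 (L[i].2) i _ _ hnn hcc, hlen0]
    have hiff : (∃ kv ∈ (st.1).keys.map (fun g => (g, (st.1).getD g [])),
        (i : Int) ∈ PySem.List.slice kv.2 none (some ((st.2).getD kv.1 0)))
        ↔ ((L[i].1 != L[i].2) = true ∧
            ((L.take i).countP (pvPred L[i].2) : Int) < (st.2).getD (L[i].2) 0) := by
      constructor
      · rintro ⟨kv, hkv, hmem⟩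
        obtain ⟨g, hg, rfl⟩ := List.mem_map.mp hkv
        rw [hpos g, PySem.List.slice_to _ (hcapnn g)] at hmem
        have hx : (i : Int) ∈ pvIdx L 0 g := List.mem_of_mem_take hmem
        have hpd := (pvIdx_mem_iff L i hi g).mp hx
        simp only [pvPred, Bool.and_eq_true, beq_iff_eq] at hpd
        obtain ⟨hmis, hgeq⟩ := hpd
        subst hgeq
        have hcnt := (pv_inc_take_mem (pvIdx L 0 L[i].2) (pvIdx_pairwise L 0 L[i].2)
          (i : Int) ((st.2).getD (L[i].2) 0).toNat hx).mp hmem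
        rw [pvIdx_countP L i (le_of_lt hi) L[i].2] at hcnt
        refine ⟨hmis, ?_⟩
        have := hcapnn (L[i].2)
        omega
      · rintro ⟨hmis, hcnt⟩
        have hpd : pvPred (L[i].2) L[i] = true := by
          simp [pvPred, hmis]
        have hx : (i : Int) ∈ pvIdx L 0 (L[i].2) := (pvIdx_mem_iff L i hi _).mpr hpd
        have hg : L[i].2 ∈ (st.1).keys := by
          by_contra hnk
          have hnone := (PySem.Dict.get?_eq_none_iff_not_mem_keys st.1 (L[i].2)).mpr hnk
          have : (st.1).getD (L[i].2) [] = [] := by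
            simp [PySem.Dict.getD, hnone]
          rw [hpos] at this
          rw [this] at hx
          simp at hx
        refine ⟨(L[i].2, (st.1).getD (L[i].2) []), List.mem_map_of_mem hg, ?_⟩
        rw [hpos, PySem.List.slice_to _ (hcapnn (L[i].2))]
        refine (pv_inc_take_mem (pvIdx L 0 L[i].2) (pvIdx_pairwise L 0 L[i].2)
          (i : Int) ((st.2).getD (L[i].2) 0).toNat hx).mpr ?_
        rw [pvIdx_countP L i (le_of_lt hi) L[i].2]
        have := hcapnn (L[i].2)
        omega
    have hout0 : (List.replicate (min secret.toList.length guess.toList.length) ("" : String))[i]?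
        = some "" := by
      rw [List.getElem?_replicate, if_pos (by omega)]

    by_cases hcond : (L[i].1 != L[i].2) = true ∧
        ((L.take i).countP (pvPred L[i].2) : Int) < (st.2).getD (L[i].2) 0
    · rw [if_pos (hiff.mpr hcond), if_pos hi]
      rw [if_pos (by simpa [PySem.Dict.getD_empty] using hcond)]
    · rw [if_neg (fun hcontra => hcond (hiff.mp hcontra)), hout0]
      rw [if_neg (by simpa [PySem.Dict.getD_empty] using hcond)]
  · have h1 : ((L.foldl (pvStepR st.2) ([], PySem.Dict.empty)).1).length = L.length := by
      rw [pv_rank_len]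
      simp
    have h2 : ((st.1).items.foldl (pvFillLetter st.2)
        (List.replicate (min secret.toList.length guess.toList.length) "")).length = L.length := by
      rw [pv_fillAll_len, hlen0]
    rw [List.getElem?_eq_none (by omega), List.getElem?_eq_none (by omega)]
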